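-- pv_equiv track=rewrite | github.com/Michael36500/EV3_LineMaze-V2 | linefollow_cvikcvak.py | normalize_pole
-- ===== SOURCE A (Python) =====
-- import math
--
-- def normalize_pole(pole):
--     delka = 20
--     out = [0] * (delka - 1)
--     ln = len(pole)
--     ln = math.floor(ln / delka) + 1
--
--     for x in range(delka - 1):
--         muth = sum(pole[ln * x :ln*(x+1)])
--         out[x] = muth
--
--     return out
-- ===== SOURCE B (Python) =====
-- def normalize_pole(pole):
--     ln = len(pole) // 20 + 1
--     out = []
--     rest = pole
--     while len(out) < 19:
--         out.append(sum(rest[:ln]))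
--         rest = rest[ln:]
--     return out
-- ===== Notes on version B (the rewrite author's own statement) =====
-- stated objective: simpler
-- what changed: Instead of indexing 19 slices pole[ln*x:ln*(x+1)] into a preallocated zero list, B walks the list once, repeatedly splitting off and summing the next ln-element chunk until 19 sums are collected.
import Mathlib
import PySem

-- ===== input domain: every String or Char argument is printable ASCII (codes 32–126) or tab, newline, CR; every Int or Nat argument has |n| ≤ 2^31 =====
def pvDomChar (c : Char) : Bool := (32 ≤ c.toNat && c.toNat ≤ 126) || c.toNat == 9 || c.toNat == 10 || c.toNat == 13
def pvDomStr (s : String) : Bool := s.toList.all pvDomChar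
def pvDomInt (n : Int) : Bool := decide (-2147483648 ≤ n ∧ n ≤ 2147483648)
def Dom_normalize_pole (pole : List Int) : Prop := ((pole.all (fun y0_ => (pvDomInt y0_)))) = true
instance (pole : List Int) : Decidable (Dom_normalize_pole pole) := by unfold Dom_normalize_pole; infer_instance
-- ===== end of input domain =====

-- B replaces A's 19 indexed slices pole[ln*x : ln*(x+1)] by one sequential walk that
-- repeatedly splits off the next ln-element chunk (objective: simpler decomposition).

-- ===== PORT A =====
def normalize_pole (pole : List Int) : List Int :=
  let delka : Int := 20
  let out : List Int := List.replicate 19 0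
  let ln : Int := pole.length
  -- math.floor(ln / delka) is exact for these ints: ported as floor division
  let ln : Int := PySem.Int.floordiv ln delka + 1
  (PySem.List.pyRange 0 (delka - 1) 1).foldl
    (fun out x =>
      let muth := (PySem.List.slice pole (some (ln * x)) (some (ln * (x + 1)))).sum
      out.set x.toNat muth) out

-- ===== PORT B =====
-- the while-loop of Source B: it appends once per pass until len(out) = 19, so exactly 19 passes
def npGo (ln : Nat) : Nat → List Int → List Int
  | 0, _ => []
  | k + 1, rest => (rest.take ln).sum :: npGo ln k (rest.drop ln)

def normalize_pole_alt (pole : List Int) : List Int :=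
  let ln : Nat := pole.length / 20 + 1
  npGo ln 19 pole

-- ===== PRECONDITION & SPEC =====
def Spec_normalize_pole (pole : List Int) (out : List Int) : Prop := out = normalize_pole_alt pole
instance (pole : List Int) (out : List Int) : Decidable (Spec_normalize_pole pole out) := by unfold Spec_normalize_pole; infer_instance

-- ===== CLAIM (what is proved, stated in full; the proofs are below) =====
def Claim_equal_normalize_pole : Prop := ∀ (pole : List Int), Dom_normalize_pole pole → Spec_normalize_pole pole (normalize_pole pole)

-- ===== LEMMAS AND PROOFS =====

-- B's chunk walk, started after j chunks, produces the slice sums for chunks j, j+1, …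
theorem npGo_eq (ln k : Nat) (pole : List Int) : ∀ (j : Nat),
    npGo ln k (pole.drop (ln * j)) =
      (List.range' j k).map (fun x => ((pole.drop (ln * x)).take ln).sum) := by
  induction k with
  | zero => intro j; simp [npGo]
  | succ k ih =>
    intro j
    rw [List.range'_succ, List.map_cons, npGo]
    refine congrArg₂ _ rfl ?_
    rw [List.drop_drop]
    have h : ln * j + ln = ln * (j + 1) := by ring
    rw [h, ih]

-- A's Python slice pole[ln*x : ln*(x+1)] is the x-th ln-chunk
theorem pv_slice_sum (pole : List Int) (ln x : Nat) :
    (PySem.List.slice pole (some ((ln : Int) * (x : Int)))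
        (some ((ln : Int) * ((x : Int) + 1)))).sum =
      ((pole.drop (ln * x)).take ln).sum := by
  have h1 : (ln : Int) * (x : Int) = ((ln * x : Nat) : Int) := by push_cast; ring
  have h2 : (ln : Int) * ((x : Int) + 1) = ((ln * x + ln : Nat) : Int) := by push_cast; ring
  rw [h1, h2, PySem.List.slice_natCast]
  have h3 : ln * x + ln - ln * x = ln := by omega
  rw [h3]

theorem pv_takeset (l : List Int) (j : Nat) (v : Int) (h : j < l.length) :
    (l.take j ++ v :: l.drop (j + 1)).take (j + 1) = l.take j ++ [v] := by
  have hl : (l.take j).length = j := by simp; omega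
  rw [List.take_append, hl]
  simp

theorem pv_dropset (l : List Int) (j k : Nat) (v : Int) (h : j < l.length) :
    (l.take j ++ v :: l.drop (j + 1)).drop (j + 1 + k) = l.drop (j + 1 + k) := by
  have hl : (l.take j).length = j := by simp; omega
  rw [List.drop_append, hl]
  rw [List.drop_eq_nil_of_le (by omega : (l.take j).length ≤ j + 1 + k), List.nil_append]
  rw [show j + 1 + k - j = k + 1 by omega, List.drop_succ_cons, List.drop_drop]

-- A's scatter-by-assignment over range(19): setting position x to f x for each x in turn
theorem pv_foldl_set_range' (f : Nat → Int) : ∀ (k j : Nat) (acc : List Int), j + k ≤ acc.length →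
    (List.range' j k).foldl (fun o x => o.set x (f x)) acc
      = acc.take j ++ (List.range' j k).map f ++ acc.drop (j + k) := by
  intro k
  induction k with
  | zero => intro j acc _; simp
  | succ k ih =>
    intro j acc h
    have hj : j < acc.length := by omega
    have hset : acc.set j (f j) = acc.take j ++ f j :: acc.drop (j + 1) := by
      rw [List.set_eq_take_append_cons_drop, if_pos hj]
    rw [List.range'_succ, List.foldl_cons, hset]
    have hlen : (acc.take j ++ f j :: acc.drop (j + 1)).length = acc.length := by
      simp; omega
    rw [ih (j + 1) _ (by omega)]
    rw [pv_takeset _ _ _ hj, pv_dropset _ _ _ _ hj]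
    rw [List.map_cons]
    rw [show j + (k + 1) = j + 1 + k by omega]
    simp

theorem normalize_pole_spec : Claim_equal_normalize_pole := by
  intro pole _
  unfold Spec_normalize_pole normalize_pole normalize_pole_alt
  simp only []
  have hfd : PySem.Int.floordiv (pole.length : Int) 20 + 1
      = ((pole.length / 20 + 1 : Nat) : Int) := by
    have h0 : PySem.Int.floordiv (pole.length : Int) 20 = ((pole.length / 20 : Nat) : Int) := by
      exact_mod_cast PySem.Int.floordiv_natCast pole.length 20
    rw [h0]; push_cast; ring
  rw [hfd]
  set ln : Nat := pole.length / 20 + 1 with hln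
  have hrange : PySem.List.pyRange 0 ((20 : Int) - 1) 1
      = (List.range' 0 19).map (fun n : Nat => (n : Int)) := by decide
  rw [hrange, List.foldl_map]
  have key : ∀ (js : List Nat) (acc : List Int),
      js.foldl (fun out (x : Nat) =>
        out.set ((x : Int)).toNat
          ((PySem.List.slice pole (some ((ln : Int) * (x : Int)))
              (some ((ln : Int) * ((x : Int) + 1)))).sum)) acc
      = js.foldl (fun out (x : Nat) =>
          out.set x (((pole.drop (ln * x)).take ln).sum)) acc := by
    intro js
    induction js with
    | nil => intro acc; rfl
    | cons a t ih =>
      intro acc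
      simp only [List.foldl_cons]
      rw [pv_slice_sum, Int.toNat_natCast]
      exact ih _
  rw [key]
  rw [pv_foldl_set_range' (fun x => ((pole.drop (ln * x)).take ln).sum) 19 0
      (List.replicate 19 0) (by simp)]
  have hnp : npGo ln 19 pole
      = (List.range' 0 19).map (fun x => ((pole.drop (ln * x)).take ln).sum) := by
    have := npGo_eq ln 19 pole 0
    simpa using this
  rw [hnp]
  simp

-- ===== VERDICT (by name: the statement is the Claim_ definition above) =====
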